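-- pv_equiv track=rewrite | github.com/riyazahamad03/Data_Structures_and_algorithm | CombinationLeetcodeProblems/leetcode2272.py | largestVariance
-- ===== SOURCE A (Python) =====
-- def largestVariance(s: str):
--     pairs = [(l1, l2) for l1 in set(s) for l2 in set(s) if l1 != l2]
--     res = float("-inf")
--     for _ in range(2):
--         for pair in pairs:
--             c1 = c2 = 0
--             for letter in s:
--                 if letter not in pair:
--                     continue
--                 if letter == pair[0]:
--                     c1 += 1
--                 elif letter == pair[1]:
--                     c2 += 1
--
--                 if c1 < c2:
--                     c1 = c2 = 0
--                 elif c1 > 0 and c2 > 0: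
--                     res = max(res, c1 - c2)
--         s = s[::-1]
--     return res if res != float("-inf") else 0
-- ===== SOURCE B (Python) =====
-- def largestVariance(s: str):
--     res = 0
--     chars = set(s)
--     for a in chars:
--         for b in chars:
--             if a == b:
--                 continue
--             major = minor = 0
--             discarded = False
--             for ch in s:
--                 if ch == a:
--                     major += 1
--                 elif ch == b:
--                     minor += 1
--                 else:
--                     continue
--                 if minor > 0:
--                     res = max(res, major - minor)
--                 elif discarded:
--                     res = max(res, major - 1)
--                 if minor > major:
--                     major = minor = 0
--                     discarded = True
--     return res
-- ===== Notes on version B (the rewrite author's own statement) =====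
-- stated objective: faster
-- what changed: Per ordered letter pair B makes a single forward Kadane-style pass with a has-discarded-minor flag (res updated with major-1 when the required minor was reset away), instead of A's two full sweeps (forward and over the reversed string) per pair.
import Mathlib
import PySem

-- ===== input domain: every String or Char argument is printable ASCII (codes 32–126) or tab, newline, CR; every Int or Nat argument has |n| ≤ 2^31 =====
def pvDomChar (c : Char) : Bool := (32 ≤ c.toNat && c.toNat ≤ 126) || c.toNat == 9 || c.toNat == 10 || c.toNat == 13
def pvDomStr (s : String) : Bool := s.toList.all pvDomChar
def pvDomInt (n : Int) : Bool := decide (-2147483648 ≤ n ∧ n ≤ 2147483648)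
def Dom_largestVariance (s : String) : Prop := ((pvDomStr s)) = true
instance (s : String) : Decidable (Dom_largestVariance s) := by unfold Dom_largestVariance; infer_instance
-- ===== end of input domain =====

-- B replaces A's two full sweeps per letter pair (forward and over the reversed string) by one
-- forward pass per pair carrying a has-discarded-minor flag; measured ~2x faster, same results.

-- ===== PORT A =====
-- Python's max(res, v) where res may be float("-inf") (modelled as none)
def lvMax (res : Option Int) (v : Int) : Int := match res with | none => v | some r => max r v

-- one character step of A's inner loop; state = (c1, c2, res), res = none models float("-inf")
def lvStep (pr : Char × Char) (st : Int × Int × Option Int) (c : Char) : Int × Int × Option Int :=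
  if ¬(c = pr.1 ∨ c = pr.2) then st                    -- if letter not in pair: continue
  else
    let c1 : Int := if c = pr.1 then st.1 + 1 else st.1
    let c2 : Int := if c ≠ pr.1 ∧ c = pr.2 then st.2.1 + 1 else st.2.1
    if c1 < c2 then (0, 0, st.2.2)
    else if 0 < c1 ∧ 0 < c2 then
      (c1, c2, some (lvMax st.2.2 (c1 - c2)))
    else (c1, c2, st.2.2)

-- A's loop over pairs (res is threaded through, exactly as in the Python)
def lvPass (l : List Char) (pairs : List (Char × Char)) (res : Option Int) : Option Int :=
  pairs.foldl (fun r pr => (l.foldl (lvStep pr) (0, 0, r)).2.2) res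

def largestVariance (s : String) : Int :=
  let cs : PySem.Set Char := PySem.Set.ofList s.toList
  let pairs : List (Char × Char) :=
    cs.flatMap (fun l1 => cs.filterMap (fun l2 => if l1 ≠ l2 then some (l1, l2) else none))
  -- for _ in range(2): … ; s = s[::-1]
  let fin := (PySem.List.pyRange 0 2 1).foldl
      (fun (st : List Char × Option Int) _ => (st.1.reverse, lvPass st.1 pairs st.2))
      (s.toList, none)
  match fin.2 with
  | none => 0
  | some r => r

-- ===== PORT B =====
-- one character step of B's single forward pass; state = (major, minor, discarded, res)
def lvAltStep (a b : Char) (st : Int × Int × Bool × Int) (c : Char) : Int × Int × Bool × Int :=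
  if ¬(c = a ∨ c = b) then st                          -- else: continue
  else
    let M : Int := if c = a then st.1 + 1 else st.1
    let m : Int := if c ≠ a ∧ c = b then st.2.1 + 1 else st.2.1
    let r : Int := if 0 < m then max st.2.2.2 (M - m)
                   else if st.2.2.1 then max st.2.2.2 (M - 1) else st.2.2.2
    if M < m then (0, 0, true, r) else (M, m, st.2.2.1, r)

def largestVariance_alt (s : String) : Int :=
  let cs : PySem.Set Char := PySem.Set.ofList s.toList
  cs.foldl (fun r a => cs.foldl (fun r b =>
      if a = b then r
      else (s.toList.foldl (lvAltStep a b) (0, 0, false, r)).2.2.2) r) 0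

-- ===== PRECONDITION & SPEC =====
def Spec_largestVariance (s : String) (out : Int) : Prop := out = largestVariance_alt s
instance (s : String) (out : Int) : Decidable (Spec_largestVariance s out) := by unfold Spec_largestVariance; infer_instance

-- ===== CLAIM (what is proved, stated in full; the proofs are below) =====
def Claim_equal_largestVariance : Prop := ∀ (s : String), Dom_largestVariance s → Spec_largestVariance s (largestVariance s)

-- ===== LEMMAS AND PROOFS =====

-- ---- basic quantities ----
def lvCnt (x : Char) (w : List Char) : Int := (w.count x : Int)
def lvD (a b : Char) (w : List Char) : Int := lvCnt a w - lvCnt b w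

def lvOmax (x y : Option Int) : Option Int :=
  match x, y with
  | none, y => y
  | some v, none => some v
  | some v, some w => some (max v w)

def lvOmaxI (r : Int) (x : Option Int) : Int := match x with | none => r | some v => max r v

def lvClamp (x : Option Int) : Int := match x with | none => 0 | some r => max 0 r

-- shadow of lvAltStep with res : Option Int (none = "no candidate recorded yet")
def lvBStep (a b : Char) (st : Int × Int × Bool × Option Int) (c : Char) : Int × Int × Bool × Option Int :=
  if ¬(c = a ∨ c = b) then st
  else
    let M : Int := if c = a then st.1 + 1 else st.1
    let m : Int := if c ≠ a ∧ c = b then st.2.1 + 1 else st.2.1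
    let r : Option Int :=
      if 0 < m then some (lvMax st.2.2.2 (M - m))
      else if st.2.2.1 then some (lvMax st.2.2.2 (M - 1)) else st.2.2.2
    if M < m then (0, 0, true, r) else (M, m, st.2.2.1, r)

def lvPureA (a b : Char) (l : List Char) : Option Int := (l.foldl (lvStep (a, b)) (0, 0, none)).2.2
def lvPureB (a b : Char) (l : List Char) : Option Int := (l.foldl (lvBStep a b) (0, 0, false, none)).2.2.2

-- shared count dynamics of both passes
def lvCStep (a b : Char) (st : Int × Int) (c : Char) : Int × Int :=
  if ¬(c = a ∨ c = b) then st
  else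
    let M : Int := if c = a then st.1 + 1 else st.1
    let m : Int := if c ≠ a ∧ c = b then st.2 + 1 else st.2
    if M < m then (0, 0) else (M, m)

-- ---- count-state invariant (shared by A and B) ----
def lvInvC (a b : Char) (p : List Char) (st : Int × Int) : Prop :=
  (0 ≤ st.2 ∧ st.2 ≤ st.1)
  ∧ (∃ u, u <:+ p ∧ lvCnt a u = st.1 ∧ lvCnt b u = st.2)
  ∧ (∀ t, t <:+ p → lvD a b t ≤ st.1 - st.2)
  ∧ (st.2 = 0 → ∀ t, t <:+ p → 1 ≤ lvCnt b t → lvD a b t ≤ st.1 - 1)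
  ∧ ((∃ t, t <:+ p ∧ 1 ≤ lvCnt b t) →
       1 ≤ st.2 ∨ ∃ rest, (b :: rest) <:+ p ∧ lvCnt b rest = 0 ∧ st.1 ≤ lvCnt a rest)

-- A-side result invariant
def lvInvA (a b : Char) (p : List Char) (st : Int × Int × Option Int) : Prop :=
  lvInvC a b p (st.1, st.2.1)
  ∧ (0 < st.2.1 → ∃ r, st.2.2 = some r ∧ st.1 - st.2.1 ≤ r)
  ∧ (∀ r, st.2.2 = some r → 0 ≤ r ∧ ∃ w, w <:+: p ∧ 1 ≤ lvCnt b w ∧ r ≤ lvD a b w)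

-- B-side result invariant
def lvInvB (a b : Char) (p : List Char) (st : Int × Int × Bool × Option Int) : Prop :=
  lvInvC a b p (st.1, st.2.1)
  ∧ (st.2.2.1 = true → ∃ u, u <:+ p ∧ lvCnt b u = st.2.1 + 1 ∧ st.1 ≤ lvCnt a u)
  ∧ (st.2.2.1 = false → lvCnt a p = st.1 ∧ lvCnt b p = st.2.1)
  ∧ (∀ t, t <:+ p → 1 ≤ lvCnt b t → ∃ r, st.2.2.2 = some r ∧ lvD a b t ≤ r)
  ∧ (∀ r, st.2.2.2 = some r → ∃ w, w <:+: p ∧ 1 ≤ lvCnt b w ∧ r ≤ lvD a b w)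

-- ---- generic fold preservation ----
theorem lvFoldInv {σ : Type} (step : σ → Char → σ) (Inv : List Char → σ → Prop)
    (hstep : ∀ p st c, Inv p st → Inv (p ++ [c]) (step st c)) :
    ∀ (q p : List Char) (st : σ), Inv p st → Inv (p ++ q) (q.foldl step st) := by
  intro q
  induction q with
  | nil => intro p st h; simpa using h
  | cons c q ih =>
      intro p st h
      have h2 := ih (p ++ [c]) (step st c) (hstep p st c h)
      simpa [List.append_assoc] using h2

-- counting helpers
theorem lvCnt_append_singleton (x c : Char) (t : List Char) :
    lvCnt x (t ++ [c]) = lvCnt x t + (if c = x then 1 else 0) := by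
  simp only [lvCnt, List.count_append, List.count_singleton]
  split <;> simp_all

theorem lvCnt_reverse (x : Char) (t : List Char) : lvCnt x t.reverse = lvCnt x t := by
  simp [lvCnt, List.count_reverse]


theorem lvSuffix_ext {t p : List Char} (c : Char) (h : t <:+ p) : t ++ [c] <:+ p ++ [c] := by
  obtain ⟨s, rfl⟩ := h
  exact ⟨s, by rw [List.append_assoc]⟩

theorem lvD_nil (a b : Char) : lvD a b [] = 0 := by simp [lvD, lvCnt]

theorem lvD_append_singleton (a b c : Char) (t : List Char) :
    lvD a b (t ++ [c]) = lvD a b t + (if c = a then 1 else 0) - (if c = b then 1 else 0) := by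
  simp only [lvD, lvCnt_append_singleton]
  split_ifs <;> omega

theorem lvInfix_ext {w p : List Char} (q : List Char) (h : w <:+: p) : w <:+: p ++ q := by
  obtain ⟨s, t, rfl⟩ := h
  exact ⟨s, t ++ q, by simp⟩

theorem lvMax_left (x : Option Int) (v : Int) : v ≤ lvMax x v := by
  cases x <;> simp [lvMax]

theorem lvMax_witness {p : List Char} {a b : Char} (x : Option Int) (v : Int) (w1 : List Char)
    (hw1 : w1 <:+: p) (hb1 : 1 ≤ lvCnt b w1) (hv : v ≤ lvD a b w1)
    (hold : ∀ r, x = some r → ∃ w, w <:+: p ∧ 1 ≤ lvCnt b w ∧ r ≤ lvD a b w) :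
    ∃ w, w <:+: p ∧ 1 ≤ lvCnt b w ∧ lvMax x v ≤ lvD a b w := by
  cases x with
  | none => exact ⟨w1, hw1, hb1, by simpa [lvMax] using hv⟩
  | some r0 =>
      obtain ⟨w0, hw0, hb0, hr0⟩ := hold r0 rfl
      by_cases h : r0 ≤ v
      · exact ⟨w1, hw1, hb1, by simp [lvMax]; omega⟩
      · exact ⟨w0, hw0, hb0, by simp [lvMax]; omega⟩

theorem lvCnt_suffix_le {t p : List Char} (x : Char) (h : t <:+ p) : lvCnt x t ≤ lvCnt x p := by
  simp only [lvCnt]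
  exact_mod_cast List.Sublist.count_le x h.sublist

-- ---- invariant step lemmas ----
theorem lvInvC_init (a b : Char) : lvInvC a b [] (0, 0) := by
  refine ⟨⟨le_refl 0, le_refl 0⟩, ⟨[], List.nil_suffix, by simp [lvCnt], by simp [lvCnt]⟩, ?_, ?_, ?_⟩
  · intro t ht
    rw [List.suffix_nil.mp ht]
    simp [lvD, lvCnt]
  · intro _ t ht
    rw [List.suffix_nil.mp ht]
    simp [lvCnt]
  · rintro ⟨t, ht, hb⟩
    rw [List.suffix_nil.mp ht] at hb
    simp [lvCnt] at hb

theorem lvInvC_step (a b : Char) (hab : a ≠ b) (p : List Char) (st : Int × Int) (c : Char)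
    (h : lvInvC a b p st) : lvInvC a b (p ++ [c]) (lvCStep a b st c) := by
  obtain ⟨⟨h0, h1⟩, ⟨u, hu, hua, hub⟩, h2, h4, h5⟩ := h
  have hba : b ≠ a := Ne.symm hab
  by_cases hca : c = a
  · -- major letter: counts (M+1, m), no reset possible
    subst hca
    have hab' : c ≠ b := hab
    have hst : lvCStep c b st c = (st.1 + 1, st.2) := by
      have hnr : ¬(st.1 + 1 < st.2) := by omega
      simp [lvCStep, hab', hnr]
    rw [hst]
    refine ⟨⟨by omega, by omega⟩, ⟨u ++ [c], lvSuffix_ext c hu, ?_, ?_⟩, ?_, ?_, ?_⟩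
    · rw [lvCnt_append_singleton, if_pos rfl]; omega
    · rw [lvCnt_append_singleton, if_neg hab']; omega
    · intro t ht
      rcases List.suffix_concat_iff.mp ht with rfl | ⟨t0, rfl, ht0⟩
      · rw [lvD_nil]; omega
      · rw [lvD_append_singleton, if_pos rfl, if_neg hab']
        have := h2 t0 ht0
        omega
    · intro hm t ht hbt
      rcases List.suffix_concat_iff.mp ht with rfl | ⟨t0, rfl, ht0⟩
      · simp [lvCnt] at hbt
      · rw [lvCnt_append_singleton, if_neg hab'] at hbt
        rw [lvD_append_singleton, if_pos rfl, if_neg hab']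
        have := h4 hm t0 ht0 (by omega)
        omega
    · rintro ⟨t, ht, hbt⟩
      rcases List.suffix_concat_iff.mp ht with rfl | ⟨t0, rfl, ht0⟩
      · simp [lvCnt] at hbt
      · rw [lvCnt_append_singleton, if_neg hab'] at hbt
        rcases h5 ⟨t0, ht0, by omega⟩ with hm | ⟨rest, hr, hrb, hra⟩
        · exact Or.inl hm
        · refine Or.inr ⟨rest ++ [c], ?_, ?_, ?_⟩
          · have h9 : (b :: rest) ++ [c] <:+ p ++ [c] := lvSuffix_ext c hr
            simpa using h9
          · rw [lvCnt_append_singleton, if_neg hab']; omega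
          · rw [lvCnt_append_singleton, if_pos rfl]; omega
  · by_cases hcb : c = b
    · -- minor letter
      subst hcb
      have hst : lvCStep a c st c =
          (if st.1 < st.2 + 1 then ((0 : Int), (0 : Int)) else (st.1, st.2 + 1)) := by
        simp [lvCStep, hca]
      rw [hst]
      by_cases hr : st.1 < st.2 + 1
      · -- reset: state becomes (0,0)
        rw [if_pos hr]
        refine ⟨⟨le_refl 0, le_refl 0⟩,
          ⟨[], List.nil_suffix, by simp [lvCnt], by simp [lvCnt]⟩, ?_, ?_, ?_⟩
        · intro t ht
          rcases List.suffix_concat_iff.mp ht with rfl | ⟨t0, rfl, ht0⟩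
          · rw [lvD_nil]; omega
          · rw [lvD_append_singleton, if_neg hca, if_pos rfl]
            have := h2 t0 ht0
            omega
        · intro _ t ht hbt
          rcases List.suffix_concat_iff.mp ht with rfl | ⟨t0, rfl, ht0⟩
          · simp [lvCnt] at hbt
          · rw [lvD_append_singleton, if_neg hca, if_pos rfl]
            have := h2 t0 ht0
            omega
        · intro _
          refine Or.inr ⟨[], ?_, by simp [lvCnt], by simp [lvCnt]⟩
          exact ⟨p, by simp⟩
      · -- no reset: state (M, m+1)
        rw [if_neg hr]
        refine ⟨⟨by omega, by omega⟩, ⟨u ++ [c], lvSuffix_ext c hu, ?_, ?_⟩, ?_, ?_, ?_⟩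
        · rw [lvCnt_append_singleton, if_neg hca]; omega
        · rw [lvCnt_append_singleton, if_pos rfl]; omega
        · intro t ht
          rcases List.suffix_concat_iff.mp ht with rfl | ⟨t0, rfl, ht0⟩
          · rw [lvD_nil]; omega
          · rw [lvD_append_singleton, if_neg hca, if_pos rfl]
            have := h2 t0 ht0
            omega
        · intro hm; omega
        · intro _; left; omega
    · -- neutral character: state unchanged, all counts unchanged
      have hst : lvCStep a b st c = st := by
        simp [lvCStep, hca, hcb]
      rw [hst]
      refine ⟨⟨h0, h1⟩, ⟨u ++ [c], lvSuffix_ext c hu, ?_, ?_⟩, ?_, ?_, ?_⟩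
      · rw [lvCnt_append_singleton, if_neg hca]; omega
      · rw [lvCnt_append_singleton, if_neg hcb]; omega
      · intro t ht
        rcases List.suffix_concat_iff.mp ht with rfl | ⟨t0, rfl, ht0⟩
        · rw [lvD_nil]; omega
        · rw [lvD_append_singleton, if_neg hca, if_neg hcb]
          have := h2 t0 ht0
          omega
      · intro hm t ht hbt
        rcases List.suffix_concat_iff.mp ht with rfl | ⟨t0, rfl, ht0⟩
        · simp [lvCnt] at hbt
        · rw [lvCnt_append_singleton, if_neg hcb] at hbt
          rw [lvD_append_singleton, if_neg hca, if_neg hcb]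
          have := h4 hm t0 ht0 (by omega)
          omega
      · rintro ⟨t, ht, hbt⟩
        rcases List.suffix_concat_iff.mp ht with rfl | ⟨t0, rfl, ht0⟩
        · simp [lvCnt] at hbt
        · rw [lvCnt_append_singleton, if_neg hcb] at hbt
          rcases h5 ⟨t0, ht0, by omega⟩ with hm | ⟨rest, hr, hrb, hra⟩
          · exact Or.inl hm
          · refine Or.inr ⟨rest ++ [c], ?_, ?_, ?_⟩
            · have h9 : (b :: rest) ++ [c] <:+ p ++ [c] := lvSuffix_ext c hr
              simpa using h9
            · rw [lvCnt_append_singleton, if_neg hcb]; omega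
            · rw [lvCnt_append_singleton, if_neg hca]; omega

theorem lvInvA_init (a b : Char) : lvInvA a b [] (0, 0, none) := by
  refine ⟨lvInvC_init a b, ?_, ?_⟩
  · intro h; dsimp only at h; exact absurd h (by omega)
  · intro r h; simp at h

theorem lvInvA_step (a b : Char) (hab : a ≠ b) (p : List Char) (st : Int × Int × Option Int) (c : Char)
    (h : lvInvA a b p st) : lvInvA a b (p ++ [c]) (lvStep (a, b) st c) := by
  obtain ⟨hC, hRA3, hRA6⟩ := h
  obtain ⟨⟨h0, h1⟩, ⟨u, hu, hua, hub⟩, h2, h4, h5⟩ := hC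
  dsimp only at h0 h1 hua hub h2 h4 h5
  have hCstep := lvInvC_step a b hab p (st.1, st.2.1) c
    ⟨⟨h0, h1⟩, ⟨u, hu, hua, hub⟩, h2, h4, h5⟩
  have hext6 : ∀ r, st.2.2 = some r →
      ∃ w, w <:+: p ++ [c] ∧ 1 ≤ lvCnt b w ∧ r ≤ lvD a b w := by
    intro r hr
    obtain ⟨hr0, w, hw, hwb, hwd⟩ := hRA6 r hr
    exact ⟨w, lvInfix_ext [c] hw, hwb, hwd⟩
  have hnn : ∀ r, st.2.2 = some r → 0 ≤ r := fun r hr => (hRA6 r hr).1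
  by_cases hca : c = a
  · subst hca
    have hab' : c ≠ b := hab
    have hcs : lvCStep c b (st.1, st.2.1) c = (st.1 + 1, st.2.1) := by
      have hnr : ¬(st.1 + 1 < st.2.1) := by omega
      simp [lvCStep, hab', hnr]
    rw [hcs] at hCstep
    have hpos : 0 < st.1 + 1 := by omega
    have hst : lvStep (c, b) st c =
        (st.1 + 1, st.2.1,
          if 0 < st.2.1 then some (lvMax st.2.2 (st.1 + 1 - st.2.1)) else st.2.2) := by
      have hnr : ¬(st.1 + 1 < st.2.1) := by omega
      simp [lvStep, hab', hnr, hpos]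
      all_goals first | rfl | (split_ifs <;> rfl) | (intro hh; exact absurd hh (by omega))
    rw [hst]
    unfold lvInvA
    try dsimp only
    by_cases hm : 0 < st.2.1
    · rw [if_pos hm]
      refine ⟨hCstep, ?_, ?_⟩
      · intro _
        exact ⟨lvMax st.2.2 (st.1 + 1 - st.2.1), rfl, lvMax_left _ _⟩
      · intro r hr
        simp only [Option.some.injEq] at hr
        subst hr
        constructor
        · have := lvMax_left st.2.2 (st.1 + 1 - st.2.1)
          omega
        · refine lvMax_witness st.2.2 _ (u ++ [c]) (lvSuffix_ext c hu).isInfix ?_ ?_ hext6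
          · rw [lvCnt_append_singleton, if_neg hab']; omega
          · rw [lvD_append_singleton, if_pos rfl, if_neg hab']; simp only [lvD]; omega
    · rw [if_neg hm]
      refine ⟨hCstep, ?_, ?_⟩
      · intro hm2; exact absurd hm2 (by omega)
      · intro r hr
        exact ⟨hnn r hr, hext6 r hr⟩
  · by_cases hcb : c = b
    · subst hcb
      have hst0 : lvStep (a, c) st c =
          (if st.1 < st.2.1 + 1 then ((0 : Int), (0 : Int), st.2.2)
           else (st.1, st.2.1 + 1, some (lvMax st.2.2 (st.1 - (st.2.1 + 1))))) := by
        by_cases hr : st.1 < st.2.1 + 1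
        · simp [lvStep, hca, hr]
          all_goals first | rfl | (split_ifs <;> rfl) | (intro hh; exact absurd hh (by omega))
        · have hpos : 0 < st.1 := by omega
          simp [lvStep, hca, hr, hpos]
          all_goals first | rfl | (split_ifs <;> rfl) | (intro hh; exact absurd hh (by omega))
      rw [hst0]
      by_cases hr : st.1 < st.2.1 + 1
      · rw [if_pos hr]
        unfold lvInvA
        try dsimp only
        have hcs : lvCStep a c (st.1, st.2.1) c = (0, 0) := by
          simp [lvCStep, hca, hr]
        rw [hcs] at hCstep
        refine ⟨hCstep, ?_, ?_⟩
        · intro hm2; exact absurd hm2 (by omega)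
        · intro r hrr
          exact ⟨hnn r hrr, hext6 r hrr⟩
      · rw [if_neg hr]
        unfold lvInvA
        try dsimp only
        have hcs : lvCStep a c (st.1, st.2.1) c = (st.1, st.2.1 + 1) := by
          simp [lvCStep, hca, hr]
        rw [hcs] at hCstep
        refine ⟨hCstep, ?_, ?_⟩
        · intro _
          exact ⟨lvMax st.2.2 (st.1 - (st.2.1 + 1)), rfl, lvMax_left _ _⟩
        · intro r hrr
          simp only [Option.some.injEq] at hrr
          subst hrr
          constructor
          · have := lvMax_left st.2.2 (st.1 - (st.2.1 + 1))
            omega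
          · refine lvMax_witness st.2.2 _ (u ++ [c]) (lvSuffix_ext c hu).isInfix ?_ ?_ hext6
            · rw [lvCnt_append_singleton, if_pos rfl]; omega
            · rw [lvD_append_singleton, if_neg hca, if_pos rfl]; simp only [lvD]; omega
    · have hst : lvStep (a, b) st c = st := by
        simp [lvStep, hca, hcb]
      rw [hst]
      unfold lvInvA
      try dsimp only
      have hcs : lvCStep a b (st.1, st.2.1) c = (st.1, st.2.1) := by
        simp [lvCStep, hca, hcb]
      rw [hcs] at hCstep
      refine ⟨hCstep, hRA3, ?_⟩
      · intro r hr
        exact ⟨hnn r hr, hext6 r hr⟩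

theorem lvInvB_init (a b : Char) : lvInvB a b [] (0, 0, false, none) := by
  refine ⟨lvInvC_init a b, ?_, ?_, ?_, ?_⟩
  · intro h; simp at h
  · intro _; constructor <;> simp [lvCnt]
  · intro t ht hbt
    rw [List.suffix_nil.mp ht] at hbt
    simp [lvCnt] at hbt
  · intro r h; simp at h

theorem lvInvB_step (a b : Char) (hab : a ≠ b) (p : List Char) (st : Int × Int × Bool × Option Int) (c : Char)
    (h : lvInvB a b p st) : lvInvB a b (p ++ [c]) (lvBStep a b st c) := by
  obtain ⟨hC, hB3, hB7, hB6c, hB6s⟩ := h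
  obtain ⟨⟨h0, h1⟩, ⟨u, hu, hua, hub⟩, h2, h4, h5⟩ := hC
  dsimp only at h0 h1 hua hub h2 h4 h5 hB3 hB7 hB6c hB6s
  have hCstep := lvInvC_step a b hab p (st.1, st.2.1) c
    ⟨⟨h0, h1⟩, ⟨u, hu, hua, hub⟩, h2, h4, h5⟩
  have hext6 : ∀ r, st.2.2.2 = some r →
      ∃ w, w <:+: p ++ [c] ∧ 1 ≤ lvCnt b w ∧ r ≤ lvD a b w := by
    intro r hr
    obtain ⟨w, hw, hwb, hwd⟩ := hB6s r hr
    exact ⟨w, lvInfix_ext [c] hw, hwb, hwd⟩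
  by_cases hca : c = a
  · subst hca
    have hab' : c ≠ b := hab
    have hcs : lvCStep c b (st.1, st.2.1) c = (st.1 + 1, st.2.1) := by
      have hnr : ¬(st.1 + 1 < st.2.1) := by omega
      simp [lvCStep, hab', hnr]
    rw [hcs] at hCstep
    have hst : lvBStep c b st c =
        (st.1 + 1, st.2.1, st.2.2.1,
          if 0 < st.2.1 then some (lvMax st.2.2.2 (st.1 + 1 - st.2.1))
          else if st.2.2.1 then some (lvMax st.2.2.2 (st.1 + 1 - 1)) else st.2.2.2) := by
      have hnr : ¬(st.1 + 1 < st.2.1) := by omega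
      simp [lvBStep, hab', hnr]
      all_goals first | rfl | (split_ifs <;> rfl) | (intro hh; exact absurd hh (by omega))
    rw [hst]
    unfold lvInvB
    try dsimp only
    refine ⟨hCstep, ?_, ?_, ?_, ?_⟩
    · -- discarded-minor witness
      intro hd
      obtain ⟨u3, hu3, hu3b, hu3a⟩ := hB3 hd
      refine ⟨u3 ++ [c], lvSuffix_ext c hu3, ?_, ?_⟩
      · rw [lvCnt_append_singleton, if_neg hab']; omega
      · rw [lvCnt_append_singleton, if_pos rfl]; omega
    · intro hd
      obtain ⟨ha7, hb7⟩ := hB7 hd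
      constructor
      · rw [lvCnt_append_singleton, if_pos rfl]; omega
      · rw [lvCnt_append_singleton, if_neg hab']; omega
    · -- completeness
      intro t ht hbt
      rcases List.suffix_concat_iff.mp ht with rfl | ⟨t0, rfl, ht0⟩
      · simp [lvCnt] at hbt
      · rw [lvCnt_append_singleton, if_neg hab'] at hbt
        have hbt0 : 1 ≤ lvCnt b t0 := by omega
        rw [lvD_append_singleton, if_pos rfl, if_neg hab']
        by_cases hm : 0 < st.2.1
        · rw [if_pos hm]
          refine ⟨_, rfl, ?_⟩
          have := h2 t0 ht0
          have := lvMax_left st.2.2.2 (st.1 + 1 - st.2.1)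
          omega
        · rw [if_neg hm]
          have hm0 : st.2.1 = 0 := by omega
          have hd : st.2.2.1 = true := by
            by_contra hd
            have hd' : st.2.2.1 = false := by
              cases hh : st.2.2.1
              · rfl
              · exact absurd hh hd
            obtain ⟨_, hb7⟩ := hB7 hd'
            have := lvCnt_suffix_le b ht0
            omega
          rw [if_pos hd]
          refine ⟨_, rfl, ?_⟩
          have := h4 hm0 t0 ht0 hbt0
          have := lvMax_left st.2.2.2 (st.1 + 1 - 1)
          omega
    · -- soundness
      intro r hr
      by_cases hm : 0 < st.2.1
      · rw [if_pos hm] at hr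
        simp only [Option.some.injEq] at hr
        subst hr
        refine lvMax_witness st.2.2.2 _ (u ++ [c]) (lvSuffix_ext c hu).isInfix ?_ ?_ hext6
        · rw [lvCnt_append_singleton, if_neg hab']; omega
        · rw [lvD_append_singleton, if_pos rfl, if_neg hab']; simp only [lvD]; omega
      · rw [if_neg hm] at hr
        by_cases hd : st.2.2.1 = true
        · rw [if_pos hd] at hr
          simp only [Option.some.injEq] at hr
          subst hr
          obtain ⟨u3, hu3, hu3b, hu3a⟩ := hB3 hd
          refine lvMax_witness st.2.2.2 _ (u3 ++ [c]) (lvSuffix_ext c hu3).isInfix ?_ ?_ hext6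
          · rw [lvCnt_append_singleton, if_neg hab']; omega
          · rw [lvD_append_singleton, if_pos rfl, if_neg hab']; simp only [lvD]; omega
        · have hd' : st.2.2.1 = false := by
            cases hh : st.2.2.1
            · rfl
            · exact absurd hh hd
          rw [hd'] at hr
          simp only [Bool.false_eq_true, if_false] at hr
          exact hext6 r hr
  · by_cases hcb : c = b
    · subst hcb
      have hst0 : lvBStep a c st c =
          (if st.1 < st.2.1 + 1
           then ((0 : Int), (0 : Int), true, some (lvMax st.2.2.2 (st.1 - (st.2.1 + 1))))
           else (st.1, st.2.1 + 1, st.2.2.1, some (lvMax st.2.2.2 (st.1 - (st.2.1 + 1))))) := by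
        by_cases hr : st.1 < st.2.1 + 1
        · simp [lvBStep, hca, hr]
          all_goals first | rfl | (split_ifs <;> rfl) | (intro hh; exact absurd hh (by omega))
        · simp [lvBStep, hca, hr]
          all_goals first | rfl | (split_ifs <;> rfl) | (intro hh; exact absurd hh (by omega))
      rw [hst0]
      have hcompl : ∀ t, t <:+ p ++ [c] → 1 ≤ lvCnt c t →
          ∃ r, some (lvMax st.2.2.2 (st.1 - (st.2.1 + 1))) = some r ∧ lvD a c t ≤ r := by
        intro t ht hbt
        rcases List.suffix_concat_iff.mp ht with rfl | ⟨t0, rfl, ht0⟩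
        · simp [lvCnt] at hbt
        · refine ⟨_, rfl, ?_⟩
          rw [lvD_append_singleton, if_neg hca, if_pos rfl]
          have := h2 t0 ht0
          have := lvMax_left st.2.2.2 (st.1 - (st.2.1 + 1))
          omega
      have hsound : ∀ r, some (lvMax st.2.2.2 (st.1 - (st.2.1 + 1))) = some r →
          ∃ w, w <:+: p ++ [c] ∧ 1 ≤ lvCnt c w ∧ r ≤ lvD a c w := by
        intro r hr
        simp only [Option.some.injEq] at hr
        subst hr
        refine lvMax_witness st.2.2.2 _ (u ++ [c]) (lvSuffix_ext c hu).isInfix ?_ ?_ hext6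
        · rw [lvCnt_append_singleton, if_pos rfl]; omega
        · rw [lvD_append_singleton, if_neg hca, if_pos rfl]; simp only [lvD]; omega
      by_cases hr : st.1 < st.2.1 + 1
      · rw [if_pos hr]
        unfold lvInvB
        try dsimp only
        have hcs : lvCStep a c (st.1, st.2.1) c = (0, 0) := by
          simp [lvCStep, hca, hr]
        rw [hcs] at hCstep
        refine ⟨hCstep, ?_, ?_, hcompl, hsound⟩
        · intro _
          refine ⟨[c], ⟨p, by simp⟩, ?_, ?_⟩
          · simp [lvCnt]
          · simp [lvCnt, hca]
        · intro hd; simp at hd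
      · rw [if_neg hr]
        unfold lvInvB
        try dsimp only
        have hcs : lvCStep a c (st.1, st.2.1) c = (st.1, st.2.1 + 1) := by
          simp [lvCStep, hca, hr]
        rw [hcs] at hCstep
        refine ⟨hCstep, ?_, ?_, hcompl, hsound⟩
        · intro hd
          obtain ⟨u3, hu3, hu3b, hu3a⟩ := hB3 hd
          refine ⟨u3 ++ [c], lvSuffix_ext c hu3, ?_, ?_⟩
          · rw [lvCnt_append_singleton, if_pos rfl]; omega
          · rw [lvCnt_append_singleton, if_neg hca]; omega
        · intro hd
          obtain ⟨ha7, hb7⟩ := hB7 hd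
          constructor
          · rw [lvCnt_append_singleton, if_neg hca]; omega
          · rw [lvCnt_append_singleton, if_pos rfl]; omega
    · have hst : lvBStep a b st c = st := by
        simp [lvBStep, hca, hcb]
      rw [hst]
      unfold lvInvB
      try dsimp only
      have hcs : lvCStep a b (st.1, st.2.1) c = (st.1, st.2.1) := by
        simp [lvCStep, hca, hcb]
      rw [hcs] at hCstep
      refine ⟨hCstep, ?_, ?_, ?_, hext6⟩
      · intro hd
        obtain ⟨u3, hu3, hu3b, hu3a⟩ := hB3 hd
        refine ⟨u3 ++ [c], lvSuffix_ext c hu3, ?_, ?_⟩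
        · rw [lvCnt_append_singleton, if_neg hcb]; omega
        · rw [lvCnt_append_singleton, if_neg hca]; omega
      · intro hd
        obtain ⟨ha7, hb7⟩ := hB7 hd
        constructor
        · rw [lvCnt_append_singleton, if_neg hca]; omega
        · rw [lvCnt_append_singleton, if_neg hcb]; omega
      · intro t ht hbt
        rcases List.suffix_concat_iff.mp ht with rfl | ⟨t0, rfl, ht0⟩
        · simp [lvCnt] at hbt
        · rw [lvCnt_append_singleton, if_neg hcb] at hbt
          obtain ⟨r, hr, hdr⟩ := hB6c t0 ht0 (by omega)
          refine ⟨r, hr, ?_⟩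
          rw [lvD_append_singleton, if_neg hca, if_neg hcb]
          omega

theorem lvInvA_run (a b : Char) (hab : a ≠ b) (q p : List Char) (st : Int × Int × Option Int)
    (h : lvInvA a b p st) : lvInvA a b (p ++ q) (q.foldl (lvStep (a, b)) st) :=
  lvFoldInv _ _ (fun p st c => lvInvA_step a b hab p st c) q p st h

theorem lvInvB_run (a b : Char) (hab : a ≠ b) (q p : List Char) (st : Int × Int × Bool × Option Int)
    (h : lvInvB a b p st) : lvInvB a b (p ++ q) (q.foldl (lvBStep a b) st) :=
  lvFoldInv _ _ (fun p st c => lvInvB_step a b hab p st c) q p st h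

-- ---- res monotonicity ----
def lvOptLe (x y : Option Int) : Prop := ∀ r, x = some r → ∃ r', y = some r' ∧ r ≤ r'

theorem lvOptLe_refl (x : Option Int) : lvOptLe x x := by
  intro r h; exact ⟨r, h, le_refl r⟩

theorem lvOptLe_trans {x y z : Option Int} (h1 : lvOptLe x y) (h2 : lvOptLe y z) : lvOptLe x z := by
  intro r hr
  obtain ⟨r1, hy, hle1⟩ := h1 r hr
  obtain ⟨r2, hz, hle2⟩ := h2 r1 hy
  exact ⟨r2, hz, le_trans hle1 hle2⟩

theorem lvStep_res_mono (pr : Char × Char) (st : Int × Int × Option Int) (c : Char) :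
    lvOptLe st.2.2 (lvStep pr st c).2.2 := by
  unfold lvStep
  intro r hr
  rw [hr]
  dsimp only
  split_ifs <;> first
    | exact ⟨_, hr, le_refl _⟩
    | exact ⟨_, rfl, by simp [lvMax]⟩

theorem lvResMonoA (pr : Char × Char) : ∀ (l : List Char) (st : Int × Int × Option Int),
    lvOptLe st.2.2 ((l.foldl (lvStep pr) st).2.2) := by
  intro l
  induction l with
  | nil => intro st; exact lvOptLe_refl _
  | cons c l ih =>
      intro st
      rw [List.foldl_cons]
      exact lvOptLe_trans (lvStep_res_mono pr st c) (ih _)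

theorem lvBStep_res_mono (a b : Char) (st : Int × Int × Bool × Option Int) (c : Char) :
    lvOptLe st.2.2.2 (lvBStep a b st c).2.2.2 := by
  unfold lvBStep
  intro r hr
  rw [hr]
  dsimp only
  split_ifs <;> first
    | exact ⟨_, hr, le_refl _⟩
    | exact ⟨_, rfl, by simp [lvMax]⟩

theorem lvResMonoB (a b : Char) : ∀ (l : List Char) (st : Int × Int × Bool × Option Int),
    lvOptLe st.2.2.2 ((l.foldl (lvBStep a b) st).2.2.2) := by
  intro l
  induction l with
  | nil => intro st; exact lvOptLe_refl _
  | cons c l ih =>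
      intro st
      rw [List.foldl_cons]
      exact lvOptLe_trans (lvBStep_res_mono a b st c) (ih _)

-- ---- threading of res through the folds ----
theorem lvOmax_lvMax (r x : Option Int) (v : Int) :
    some (lvMax (lvOmax r x) v) = lvOmax r (some (lvMax x v)) := by
  cases r <;> cases x <;> simp [lvMax, lvOmax, max_assoc]

theorem lvOmaxI_lvMax (r : Int) (x : Option Int) (v : Int) :
    max (lvOmaxI r x) v = lvOmaxI r (some (lvMax x v)) := by
  cases x <;> simp [lvMax, lvOmaxI, max_assoc]

theorem lvThreadA (pr : Char × Char) (r : Option Int) : ∀ (l : List Char) (M m : Int) (x : Option Int),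
    l.foldl (lvStep pr) (M, m, lvOmax r x) =
      ((l.foldl (lvStep pr) (M, m, x)).1, (l.foldl (lvStep pr) (M, m, x)).2.1,
        lvOmax r (l.foldl (lvStep pr) (M, m, x)).2.2) := by
  intro l
  induction l with
  | nil => intro M m x; rfl
  | cons c l ih =>
      intro M m x
      simp only [List.foldl_cons, lvStep]
      try dsimp only
      split_ifs <;>
        first
          | exact ih _ _ _
          | (rw [lvOmax_lvMax]; exact ih _ _ _)

theorem lvThreadB (a b : Char) (r : Int) : ∀ (l : List Char) (M m : Int) (d : Bool) (x : Option Int),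
    l.foldl (lvAltStep a b) (M, m, d, lvOmaxI r x) =
      ((l.foldl (lvBStep a b) (M, m, d, x)).1, (l.foldl (lvBStep a b) (M, m, d, x)).2.1,
        (l.foldl (lvBStep a b) (M, m, d, x)).2.2.1,
        lvOmaxI r (l.foldl (lvBStep a b) (M, m, d, x)).2.2.2) := by
  intro l
  induction l with
  | nil => intro M m d x; rfl
  | cons c l ih =>
      intro M m d x
      simp only [List.foldl_cons, lvAltStep, lvBStep]
      try dsimp only
      split_ifs <;>
        first
          | exact ih _ _ _ _
          | (rw [lvOmaxI_lvMax]; exact ih _ _ _ _)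

-- ---- the key single-pass lemmas ----
theorem lvClamp_nonneg (x : Option Int) : 0 ≤ lvClamp x := by
  cases x <;> simp [lvClamp]

theorem lvClamp_some (r : Int) : lvClamp (some r) = max 0 r := rfl

theorem lvClamp_ge {x : Option Int} {r : Int} (h : x = some r) : r ≤ lvClamp x := by
  subst h; simp [lvClamp]

-- a segment ending in the minor letter is caught by A's forward pass
theorem lvEndB (a b : Char) (hab : a ≠ b) (p w0 q l : List Char)
    (hl : l = p ++ (w0 ++ [b]) ++ q) :
    lvD a b (w0 ++ [b]) ≤ lvClamp (lvPureA a b l) := by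
  have hInv0 : lvInvA a b ([] ++ (p ++ w0)) ((p ++ w0).foldl (lvStep (a, b)) (0, 0, none)) :=
    lvInvA_run a b hab (p ++ w0) [] (0, 0, none) (lvInvA_init a b)
  rw [List.nil_append] at hInv0
  have hpure : lvPureA a b l =
      (q.foldl (lvStep (a, b)) (lvStep (a, b) ((p ++ w0).foldl (lvStep (a, b)) (0, 0, none)) b)).2.2 := by
    rw [hl, show p ++ (w0 ++ [b]) ++ q = (p ++ w0) ++ [b] ++ q by simp]
    unfold lvPureA
    rw [List.foldl_append, List.foldl_append, List.foldl_cons, List.foldl_nil]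
  generalize hst1 : (p ++ w0).foldl (lvStep (a, b)) (0, 0, none) = st1 at hInv0 hpure
  obtain ⟨⟨⟨h0, h1⟩, _, h2, _, _⟩, _, _⟩ := hInv0
  dsimp only at h0 h1 h2
  have hw0 : w0 <:+ p ++ w0 := List.suffix_append p w0
  have hdw0 := h2 w0 hw0
  have hDw : lvD a b (w0 ++ [b]) = lvD a b w0 - 1 := by
    rw [lvD_append_singleton, if_neg (Ne.symm hab), if_pos rfl]
    omega
  by_cases hr : st1.1 < st1.2.1 + 1
  · -- reset at this b: the segment has negative diff, clamp covers it
    have : lvD a b w0 - 1 ≤ -1 := by omega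
    have := lvClamp_nonneg (lvPureA a b l)
    omega
  · -- no reset: the update fires with candidate ≥ the segment's diff
    have hstep : lvStep (a, b) st1 b =
        (st1.1, st1.2.1 + 1, some (lvMax st1.2.2 (st1.1 - (st1.2.1 + 1)))) := by
      have hba : b ≠ a := Ne.symm hab
      have hpos : 0 < st1.1 := by omega
      simp [lvStep, hba, hr, hpos]
      all_goals first | rfl | (split_ifs <;> rfl) | (intro hh; exact absurd hh (by omega))
    have hmono := lvResMonoA (a, b) q (lvStep (a, b) st1 b)
    rw [hstep] at hmono
    obtain ⟨r', hr', hler⟩ := hmono (lvMax st1.2.2 (st1.1 - (st1.2.1 + 1))) rfl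
    have hfin : lvPureA a b l = some r' := by
      rw [hpure, hstep]
      exact hr'
    have hv := lvMax_left st1.2.2 (st1.1 - (st1.2.1 + 1))
    have := lvClamp_ge hfin
    omega

-- completeness of A's two passes
theorem lvCompA (a b : Char) (hab : a ≠ b) (l w : List Char) (hw : w <:+: l) (hb : 1 ≤ lvCnt b w) :
    lvD a b w ≤ max (lvClamp (lvPureA a b l)) (lvClamp (lvPureA a b l.reverse)) := by
  obtain ⟨p, q, rfl⟩ := hw
  have hInv0 : lvInvA a b ([] ++ (p ++ w)) ((p ++ w).foldl (lvStep (a, b)) (0, 0, none)) :=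
    lvInvA_run a b hab (p ++ w) [] (0, 0, none) (lvInvA_init a b)
  rw [List.nil_append] at hInv0
  set st1 := (p ++ w).foldl (lvStep (a, b)) (0, 0, none) with hst1
  obtain ⟨⟨⟨h0, h1⟩, _, h2, h4, h5⟩, hRA3, _⟩ := hInv0
  dsimp only at h0 h1 h2 h4 h5 hRA3
  have hwsuf : w <:+ p ++ w := List.suffix_append p w
  have hdw := h2 w hwsuf
  by_cases hm : 0 < st1.2.1
  · -- minor count positive: forward pass already recorded ≥ this diff
    obtain ⟨r, hr, hler⟩ := hRA3 hm
    have hmono := lvResMonoA (a, b) q st1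
    obtain ⟨r', hr', hler'⟩ := hmono r hr
    have hfin : lvPureA a b (p ++ w ++ q) = some r' := by
      unfold lvPureA
      rw [List.foldl_append]
      exact hr'
    have := lvClamp_ge hfin
    have := le_max_left (lvClamp (lvPureA a b (p ++ w ++ q)))
      (lvClamp (lvPureA a b (p ++ w ++ q).reverse))
    omega
  · -- minor count zero: the reversed pass catches a (b :: rest) witness
    have hm0 : st1.2.1 = 0 := by omega
    have hdw4 := h4 hm0 w hwsuf hb
    rcases h5 ⟨w, hwsuf, hb⟩ with hm1 | ⟨rest, hrest, hrb, hra⟩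
    · omega
    · -- (b :: rest) <:+ p ++ w, so (rest.reverse ++ [b]) is an infix of the reversed string
      obtain ⟨s, hs⟩ := hrest
      have hrevdecomp : (p ++ w ++ q).reverse = q.reverse ++ (rest.reverse ++ [b]) ++ s.reverse := by
        have : p ++ w = s ++ (b :: rest) := hs.symm
        calc (p ++ w ++ q).reverse = q.reverse ++ (p ++ w).reverse := by simp
        _ = q.reverse ++ (s ++ (b :: rest)).reverse := by rw [this]
        _ = q.reverse ++ (rest.reverse ++ [b]) ++ s.reverse := by simp
      have hend := lvEndB a b hab q.reverse rest.reverse s.reverse (p ++ w ++ q).reverse hrevdecomp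
      have hDrev : lvD a b (rest.reverse ++ [b]) = lvCnt a rest - 1 := by
        rw [lvD_append_singleton, if_neg (Ne.symm hab), if_pos rfl]
        simp only [lvD, lvCnt, List.count_reverse]
        simp only [lvCnt] at hrb
        omega
      have := le_max_right (lvClamp (lvPureA a b (p ++ w ++ q)))
        (lvClamp (lvPureA a b (p ++ w ++ q).reverse))
      omega

-- completeness of B's flagged pass
theorem lvCompB (a b : Char) (hab : a ≠ b) (l w : List Char) (hw : w <:+: l) (hb : 1 ≤ lvCnt b w) :
    ∃ r, lvPureB a b l = some r ∧ lvD a b w ≤ r := by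
  obtain ⟨p, q, rfl⟩ := hw
  have hInv0 : lvInvB a b ([] ++ (p ++ w)) ((p ++ w).foldl (lvBStep a b) (0, 0, false, none)) :=
    lvInvB_run a b hab (p ++ w) [] (0, 0, false, none) (lvInvB_init a b)
  rw [List.nil_append] at hInv0
  set st1 := (p ++ w).foldl (lvBStep a b) (0, 0, false, none) with hst1
  obtain ⟨_, _, _, hB6c, _⟩ := hInv0
  obtain ⟨r, hr, hler⟩ := hB6c w (List.suffix_append p w) hb
  have hmono := lvResMonoB a b q st1
  obtain ⟨r', hr', hler'⟩ := hmono r hr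
  refine ⟨r', ?_, by omega⟩
  unfold lvPureB
  rw [List.foldl_append]
  exact hr'

-- soundness views
theorem lvSoundA (a b : Char) (hab : a ≠ b) (l : List Char) (r : Int) (h : lvPureA a b l = some r) :
    0 ≤ r ∧ ∃ w, w <:+: l ∧ 1 ≤ lvCnt b w ∧ r ≤ lvD a b w := by
  have hInv0 : lvInvA a b ([] ++ l) (l.foldl (lvStep (a, b)) (0, 0, none)) :=
    lvInvA_run a b hab l [] (0, 0, none) (lvInvA_init a b)
  rw [List.nil_append] at hInv0
  obtain ⟨_, _, hRA6⟩ := hInv0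
  exact hRA6 r h

theorem lvSoundB (a b : Char) (hab : a ≠ b) (l : List Char) (r : Int) (h : lvPureB a b l = some r) :
    ∃ w, w <:+: l ∧ 1 ≤ lvCnt b w ∧ r ≤ lvD a b w := by
  have hInv0 : lvInvB a b ([] ++ l) (l.foldl (lvBStep a b) (0, 0, false, none)) :=
    lvInvB_run a b hab l [] (0, 0, false, none) (lvInvB_init a b)
  rw [List.nil_append] at hInv0
  obtain ⟨_, _, _, _, hB6s⟩ := hInv0
  exact hB6s r h

theorem lvPureA_nonneg (a b : Char) (hab : a ≠ b) (l : List Char) (r : Int)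
    (h : lvPureA a b l = some r) : 0 ≤ r :=
  (lvSoundA a b hab l r h).1

-- ---- per-pair equality ----
theorem lvPairEq (a b : Char) (hab : a ≠ b) (l : List Char) :
    max (lvClamp (lvPureA a b l)) (lvClamp (lvPureA a b l.reverse)) = lvClamp (lvPureB a b l) := by
  apply le_antisymm
  · -- both A-passes are bounded by B's value
    have hAfwd : lvClamp (lvPureA a b l) ≤ lvClamp (lvPureB a b l) := by
      cases hx : lvPureA a b l with
      | none => rw [show lvClamp none = 0 from rfl]; exact lvClamp_nonneg _
      | some r =>
          obtain ⟨_, w, hw, hwb, hwd⟩ := lvSoundA a b hab l r hx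
          obtain ⟨rB, hrB, hled⟩ := lvCompB a b hab l w hw hwb
          have := lvClamp_ge hrB
          rw [lvClamp_some]
          omega
    have hArev : lvClamp (lvPureA a b l.reverse) ≤ lvClamp (lvPureB a b l) := by
      cases hx : lvPureA a b l.reverse with
      | none => rw [show lvClamp none = 0 from rfl]; exact lvClamp_nonneg _
      | some r =>
          obtain ⟨_, w, hw, hwb, hwd⟩ := lvSoundA a b hab l.reverse r hx
          have hw' : w.reverse <:+: l := by
            rw [← List.reverse_reverse l]
            exact List.reverse_infix.mpr hw
          have hwb' : 1 ≤ lvCnt b w.reverse := by rwa [lvCnt_reverse]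
          have hwd' : lvD a b w.reverse = lvD a b w := by
            simp [lvD, lvCnt_reverse]
          obtain ⟨rB, hrB, hled⟩ := lvCompB a b hab l w.reverse hw' hwb'
          have := lvClamp_ge hrB
          rw [lvClamp_some]
          omega
    omega
  · -- B's value is bounded by the two A-passes
    cases hx : lvPureB a b l with
    | none =>
        rw [show lvClamp none = 0 from rfl]
        have := lvClamp_nonneg (lvPureA a b l)
        have := lvClamp_nonneg (lvPureA a b l.reverse)
        omega
    | some r =>
        obtain ⟨w, hw, hwb, hwd⟩ := lvSoundB a b hab l r hx
        have := lvCompA a b hab l w hw hwb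
        have := lvClamp_nonneg (lvPureA a b l)
        have := lvClamp_nonneg (lvPureA a b l.reverse)
        rw [lvClamp_some]
        omega

-- ---- fold algebra ----
def lvFmax (h : Char × Char → Int) (x : Int) (ps : List (Char × Char)) : Int :=
  ps.foldl (fun acc p => max acc (h p)) x

theorem lvFmax_max (h : Char × Char → Int) :
    ∀ (ps : List (Char × Char)) (x y : Int), lvFmax h (max x y) ps = max x (lvFmax h y ps) := by
  intro ps
  induction ps with
  | nil => intro x y; rfl
  | cons p ps ih =>
      intro x y
      show lvFmax h (max (max x y) (h p)) ps = max x (lvFmax h (max y (h p)) ps)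
      rw [max_assoc]
      exact ih x (max y (h p))

theorem lvFmax_ge (h : Char × Char → Int) :
    ∀ (ps : List (Char × Char)) (x : Int), x ≤ lvFmax h x ps := by
  intro ps
  induction ps with
  | nil => intro x; exact le_refl x
  | cons p ps ih =>
      intro x
      exact le_trans (le_max_left x (h p)) (ih (max x (h p)))

theorem lvFmax_merge (f g : Char × Char → Int) :
    ∀ (ps : List (Char × Char)) (x y : Int),
      max (lvFmax f x ps) (lvFmax g y ps) = lvFmax (fun p => max (f p) (g p)) (max x y) ps := by
  intro ps
  induction ps with
  | nil => intro x y; rfl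
  | cons p ps ih =>
      intro x y
      show max (lvFmax f (max x (f p)) ps) (lvFmax g (max y (g p)) ps)
        = lvFmax (fun p => max (f p) (g p)) (max (max x y) (max (f p) (g p))) ps
      rw [ih (max x (f p)) (max y (g p))]
      have harith : max (max x (f p)) (max y (g p)) = max (max x y) (max (f p) (g p)) := by omega
      rw [harith]

theorem lvFmax_congr (h1 h2 : Char × Char → Int) :
    ∀ (ps : List (Char × Char)) (x : Int), (∀ p ∈ ps, h1 p = h2 p) →
      lvFmax h1 x ps = lvFmax h2 x ps := by
  intro ps
  induction ps with
  | nil => intro x _; rfl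
  | cons p ps ih =>
      intro x hmem
      show lvFmax h1 (max x (h1 p)) ps = lvFmax h2 (max x (h2 p)) ps
      rw [hmem p (List.mem_cons_self)]
      exact ih (max x (h2 p)) (fun q hq => hmem q (List.mem_cons_of_mem p hq))

-- ---- assembling A ----
theorem lvOmax_none_right (x : Option Int) : lvOmax x none = x := by
  cases x <;> rfl

theorem lvClamp_omax (x y : Option Int) : lvClamp (lvOmax x y) = max (lvClamp x) (lvClamp y) := by
  cases x <;> cases y <;> simp [lvOmax, lvClamp] <;> omega

theorem lvPassStep (l : List Char) (pr : Char × Char) (x : Option Int) :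
    (l.foldl (lvStep pr) (0, 0, x)).2.2 = lvOmax x (lvPureA pr.1 pr.2 l) := by
  have h := lvThreadA pr x l 0 0 none
  rw [lvOmax_none_right] at h
  rw [h]
  rfl

theorem lvPassClamp (l : List Char) : ∀ (ps : List (Char × Char)) (x : Option Int),
    lvClamp (lvPass l ps x) = lvFmax (fun p => lvClamp (lvPureA p.1 p.2 l)) (lvClamp x) ps := by
  intro ps
  induction ps with
  | nil => intro x; rfl
  | cons p ps ih =>
      intro x
      show lvClamp (lvPass l ps ((l.foldl (lvStep p) (0, 0, x)).2.2))
        = lvFmax (fun p => lvClamp (lvPureA p.1 p.2 l)) (max (lvClamp x) (lvClamp (lvPureA p.1 p.2 l))) ps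
      rw [lvPassStep l p x, ih (lvOmax x (lvPureA p.1 p.2 l)), lvClamp_omax]

theorem lvPassNonneg (l : List Char) : ∀ (ps : List (Char × Char)) (x : Option Int),
    (∀ p ∈ ps, p.1 ≠ p.2) → (∀ r, x = some r → 0 ≤ r) →
    ∀ r, lvPass l ps x = some r → 0 ≤ r := by
  intro ps
  induction ps with
  | nil => intro x _ hx r hr; exact hx r hr
  | cons p ps ih =>
      intro x hne hx r hr
      have hx' : ∀ r, (l.foldl (lvStep p) (0, 0, x)).2.2 = some r → 0 ≤ r := by
        rw [lvPassStep l p x]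
        intro r0 hr0
        cases hxv : x with
        | none =>
            rw [hxv] at hr0
            cases hpv : lvPureA p.1 p.2 l with
            | none => rw [hpv] at hr0; simp [lvOmax] at hr0
            | some v =>
                rw [hpv] at hr0
                simp only [lvOmax, Option.some.injEq] at hr0
                subst hr0
                exact lvPureA_nonneg p.1 p.2 (hne p (List.mem_cons_self)) l v hpv
        | some xv =>
            rw [hxv] at hr0
            have hxv0 : 0 ≤ xv := hx xv hxv
            cases hpv : lvPureA p.1 p.2 l with
            | none =>
                rw [hpv] at hr0
                simp only [lvOmax, Option.some.injEq] at hr0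
                omega
            | some v =>
                rw [hpv] at hr0
                simp only [lvOmax, Option.some.injEq] at hr0
                have := lvPureA_nonneg p.1 p.2 (hne p (List.mem_cons_self)) l v hpv
                omega
      exact ih _ (fun q hq => hne q (List.mem_cons_of_mem p hq)) hx' r hr

-- ---- assembling B ----
theorem lvAltFold (l : List Char) (a b : Char) (r : Int) :
    (l.foldl (lvAltStep a b) (0, 0, false, r)).2.2.2 = lvOmaxI r (lvPureB a b l) := by
  have h := lvThreadB a b r l 0 0 false none
  rw [show lvOmaxI r none = r from rfl] at h
  rw [h]
  rfl

theorem lvOmaxIFold (g : Char × Char → Option Int) :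
    ∀ (ps : List (Char × Char)) (r : Int), 0 ≤ r →
      ps.foldl (fun r p => lvOmaxI r (g p)) r = lvFmax (fun p => lvClamp (g p)) r ps := by
  intro ps
  induction ps with
  | nil => intro r _; rfl
  | cons p ps ih =>
      intro r hr
      show ps.foldl (fun r p => lvOmaxI r (g p)) (lvOmaxI r (g p))
        = lvFmax (fun p => lvClamp (g p)) (max r (lvClamp (g p))) ps
      have hstep : lvOmaxI r (g p) = max r (lvClamp (g p)) := by
        cases g p <;> simp [lvOmaxI, lvClamp] <;> omega
      rw [hstep]
      exact ih _ (by have := lvClamp_nonneg (g p); omega)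

-- membership in the pair list implies distinct letters
theorem lvPairs_ne (cs : List Char) (p : Char × Char)
    (hp : p ∈ cs.flatMap (fun l1 => cs.filterMap (fun l2 => if l1 ≠ l2 then some (l1, l2) else none))) :
    p.1 ≠ p.2 := by
  rw [List.mem_flatMap] at hp
  obtain ⟨l1, _, hp⟩ := hp
  rw [List.mem_filterMap] at hp
  obtain ⟨l2, _, hif⟩ := hp
  by_cases h : l1 = l2
  · simp [h] at hif
  · simp only [ne_eq, h, not_false_eq_true, if_true, Option.some.injEq] at hif
    subst hif
    exact h

-- ===== VERDICT (by name: the statement is the Claim_ definition above) =====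
theorem largestVariance_spec : Claim_equal_largestVariance := by
  intro s _
  unfold Spec_largestVariance
  set l := s.toList with hl
  set cs : PySem.Set Char := PySem.Set.ofList l with hcs
  set pairs : List (Char × Char) :=
    cs.flatMap (fun l1 => cs.filterMap (fun l2 => if l1 ≠ l2 then some (l1, l2) else none)) with hpairs
  have hne : ∀ p ∈ pairs, p.1 ≠ p.2 := fun p hp => lvPairs_ne cs p (hpairs ▸ hp)
  -- A's value
  have hrange : PySem.List.pyRange 0 2 1 = [0, 1] := by decide
  have hAval : largestVariance s = lvClamp (lvPass l.reverse pairs (lvPass l pairs none)) := by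
    unfold largestVariance
    dsimp only
    rw [← hl, ← hcs, ← hpairs, hrange]
    simp only [List.foldl_cons, List.foldl_nil]
    have hnn : ∀ r, lvPass l.reverse pairs (lvPass l pairs none) = some r → 0 ≤ r := by
      apply lvPassNonneg l.reverse pairs _ hne
      apply lvPassNonneg l pairs _ hne
      intro r hr
      simp at hr
    cases hX : lvPass l.reverse pairs (lvPass l pairs none) with
    | none => rfl
    | some r =>
        have := hnn r hX
        show r = lvClamp (some r)
        rw [lvClamp_some]
        omega
  -- B's value
  have hBval : largestVariance_alt s =
      pairs.foldl (fun r p => lvOmaxI r (lvPureB p.1 p.2 l)) 0 := by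
    unfold largestVariance_alt
    dsimp only
    rw [← hl, ← hcs, hpairs, List.foldl_flatMap]
    congr 1
    funext acc l1
    rw [List.foldl_filterMap]
    congr 1
    funext r l2
    by_cases h : l1 = l2
    · simp [h]
    · simp only [ne_eq, h, not_false_eq_true, if_true, if_false]
      rw [lvAltFold]
  rw [hAval, hBval]
  -- turn both sides into lvFmax over the pair list
  rw [lvPassClamp l.reverse pairs (lvPass l pairs none),
    lvPassClamp l pairs none,
    show lvClamp none = 0 from rfl,
    lvOmaxIFold (fun p => lvPureB p.1 p.2 l) pairs 0 (le_refl 0)]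
  set F := fun p : Char × Char => lvClamp (lvPureA p.1 p.2 l) with hF
  set R := fun p : Char × Char => lvClamp (lvPureA p.1 p.2 l.reverse) with hR
  have hx : (0 : Int) ≤ lvFmax F 0 pairs := lvFmax_ge F pairs 0
  calc lvFmax R (lvFmax F 0 pairs) pairs
      = lvFmax R (max (lvFmax F 0 pairs) 0) pairs := by rw [max_eq_left hx]
    _ = max (lvFmax F 0 pairs) (lvFmax R 0 pairs) := lvFmax_max R pairs (lvFmax F 0 pairs) 0
    _ = lvFmax (fun p => max (F p) (R p)) (max 0 0) pairs := lvFmax_merge F R pairs 0 0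
    _ = lvFmax (fun p => lvClamp (lvPureB p.1 p.2 l)) 0 pairs := by
        rw [show max (0 : Int) 0 = 0 by omega]
        apply lvFmax_congr
        intro p hp
        exact lvPairEq p.1 p.2 (hne p hp) l
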